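-- pv_equiv track=rewrite | github.com/yeonjae-jo/coding-test | python/programmers/level_0/[PCCE 기출문제] 5번 산책.py | solution
-- ===== SOURCE A (Python) =====
-- def solution(route):
--     east, north = 0, 0
--     for i in route:
--         if i == "N":
--             north += 1
--         elif i == "S":
--             north += -1
--         elif i == "E":
--             east += 1
--         elif i == "W":
--             east += -1
--     return [east, north]
-- ===== SOURCE B (Python) =====
-- def solution(route):
--     return [route.count("E") - route.count("W"),
--             route.count("N") - route.count("S")]
-- ===== Notes on version B (the rewrite author's own statement) =====
-- stated objective: simpler
-- what changed: Replaced the single branching accumulator loop with four independent counting scans (list.count) combined into a closed-form pair.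
import Mathlib
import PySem

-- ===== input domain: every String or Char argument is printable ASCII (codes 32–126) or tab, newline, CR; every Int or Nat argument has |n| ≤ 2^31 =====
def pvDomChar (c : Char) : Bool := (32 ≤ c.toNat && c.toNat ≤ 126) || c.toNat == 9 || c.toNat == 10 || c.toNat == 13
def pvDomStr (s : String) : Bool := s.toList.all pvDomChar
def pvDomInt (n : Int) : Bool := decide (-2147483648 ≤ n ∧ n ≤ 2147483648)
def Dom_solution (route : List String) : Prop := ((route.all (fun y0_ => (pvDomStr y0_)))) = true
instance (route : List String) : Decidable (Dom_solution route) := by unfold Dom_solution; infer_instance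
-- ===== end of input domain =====

-- ===== PORT A =====
-- A: single pass with a branching (east, north) accumulator.
def solution (route : List String) : List Int :=
  let p := route.foldl (fun (s : Int × Int) i =>
    if i == "N" then (s.1, s.2 + 1)
    else if i == "S" then (s.1, s.2 + (-1))
    else if i == "E" then (s.1 + 1, s.2)
    else if i == "W" then (s.1 + (-1), s.2)
    else s) (0, 0)
  [p.1, p.2]

-- ===== PORT B =====
-- B: four independent counting scans, closed form (no loop state).
def solution_alt (route : List String) : List Int :=
  [(PySem.List.count route "E" : Int) - PySem.List.count route "W",
   (PySem.List.count route "N" : Int) - PySem.List.count route "S"]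

-- ===== PRECONDITION & SPEC =====
def Spec_solution (route : List String) (out : List Int) : Prop := out = solution_alt route
instance (route : List String) (out : List Int) : Decidable (Spec_solution route out) := by unfold Spec_solution; infer_instance

-- ===== CLAIM (what is proved, stated in full; the proofs are below) =====
def Claim_equal_solution : Prop := ∀ (route : List String), Dom_solution route → Spec_solution route (solution route)

-- ===== LEMMAS AND PROOFS =====

-- ===== VERDICT (by name: the statement is the Claim_ definition above) =====
theorem foldl_counts (route : List String) (e n : Int) :
    route.foldl (fun (s : Int × Int) i =>
      if i == "N" then (s.1, s.2 + 1)
      else if i == "S" then (s.1, s.2 + (-1))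
      else if i == "E" then (s.1 + 1, s.2)
      else if i == "W" then (s.1 + (-1), s.2)
      else s) (e, n)
    = (e + (route.count "E" : Int) - route.count "W",
       n + (route.count "N" : Int) - route.count "S") := by
  induction route generalizing e n with
  | nil => simp
  | cons x xs ih =>
    simp only [List.foldl_cons, List.count_cons]
    by_cases h1 : x = "N" <;> by_cases h2 : x = "S" <;> by_cases h3 : x = "E" <;>
      by_cases h4 : x = "W" <;> simp_all <;> ring

theorem solution_spec : Claim_equal_solution := by
  intro route _
  unfold Spec_solution solution solution_alt
  rw [foldl_counts]
  simp [PySem.List.count_eq]
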